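-- pv_equiv track=rewrite | github.com/lucas-rodrigues0/hackerrank-python | Sets/no_idea.py | happiness_count
-- ===== SOURCE A (Python) =====
-- def happiness_count(arr, like, dislike):
--     happiness = 0
--
--     for i in arr:
--         if i in like:
--             happiness += 1
--         if i in dislike:
--             happiness -= 1
--
--     return happiness
-- ===== SOURCE B (Python) =====
-- def happiness_count(arr, like, dislike):
--     counts = {}
--     for x in arr:
--         counts[x] = counts.get(x, 0) + 1
--     return sum(counts.get(x, 0) for x in set(like)) - sum(counts.get(x, 0) for x in set(dislike))
-- ===== Notes on version B (the rewrite author's own statement) =====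
-- stated objective: alternative
-- what changed: B builds a frequency table of arr once and sums the occurrence counts of the distinct liked values minus the distinct disliked values, instead of scanning arr and testing membership in like and dislike for every element.
import Mathlib
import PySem

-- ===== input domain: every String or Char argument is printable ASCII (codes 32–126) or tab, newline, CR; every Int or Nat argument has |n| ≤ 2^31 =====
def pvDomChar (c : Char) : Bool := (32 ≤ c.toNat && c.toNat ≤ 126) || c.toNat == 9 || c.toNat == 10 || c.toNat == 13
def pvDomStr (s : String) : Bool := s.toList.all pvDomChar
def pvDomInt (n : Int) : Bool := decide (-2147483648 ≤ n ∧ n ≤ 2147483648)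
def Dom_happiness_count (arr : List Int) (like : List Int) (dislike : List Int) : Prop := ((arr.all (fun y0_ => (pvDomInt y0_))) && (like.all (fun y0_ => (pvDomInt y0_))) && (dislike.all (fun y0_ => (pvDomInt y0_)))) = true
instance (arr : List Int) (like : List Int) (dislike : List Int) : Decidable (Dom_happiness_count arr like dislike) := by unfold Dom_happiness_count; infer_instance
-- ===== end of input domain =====

-- B builds a frequency table of arr once and sums counts over the distinct like/dislike values,
-- instead of A's scan of arr with a membership test in like and dislike per element.


-- ===== PORT A =====
def happiness_count (arr : List Int) (like : List Int) (dislike : List Int) : Int :=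
  arr.foldl (fun happiness i =>
    let happiness := if i ∈ like then happiness + 1 else happiness
    if i ∈ dislike then happiness - 1 else happiness) 0

-- ===== PORT B =====
def happiness_count_alt (arr : List Int) (like : List Int) (dislike : List Int) : Int :=
  let counts := arr.foldl (fun d x => d.insert x (d.getD x 0 + 1)) (PySem.Dict.empty : PySem.Dict Int Int)
  ((PySem.Set.ofList like).map (fun x => counts.getD x 0)).sum
    - ((PySem.Set.ofList dislike).map (fun x => counts.getD x 0)).sum

-- ===== PRECONDITION & SPEC =====
def Spec_happiness_count (arr : List Int) (like : List Int) (dislike : List Int) (out : Int) : Prop := out = happiness_count_alt arr like dislike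
instance (arr : List Int) (like : List Int) (dislike : List Int) (out : Int) : Decidable (Spec_happiness_count arr like dislike out) := by unfold Spec_happiness_count; infer_instance

-- ===== CLAIM (what is proved, stated in full; the proofs are below) =====
def Claim_equal_happiness_count : Prop := ∀ (arr : List Int) (like : List Int) (dislike : List Int), Dom_happiness_count arr like dislike → Spec_happiness_count arr like dislike (happiness_count arr like dislike)

-- ===== LEMMAS AND PROOFS =====

-- A's loop computes init + #(arr hits in like) - #(arr hits in dislike)
theorem happinessA_foldl (like dislike : List Int) : ∀ (arr : List Int) (init : Int),
    arr.foldl (fun happiness i =>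
      let happiness := if i ∈ like then happiness + 1 else happiness
      if i ∈ dislike then happiness - 1 else happiness) init
    = init + (arr.countP (fun i => decide (i ∈ like)) : Int)
          - (arr.countP (fun i => decide (i ∈ dislike)) : Int) := by
  intro arr
  induction arr with
  | nil => intro init; simp
  | cons a arr ih =>
    intro init
    simp only [List.foldl_cons, List.countP_cons, ih]
    by_cases hl : a ∈ like <;> by_cases hd : a ∈ dislike <;>
      simp [hl, hd] <;> omega

-- an indicator sum over a duplicate-free list is a membership test
theorem sum_ite_nodup (a : Int) : ∀ (S : List Int), S.Nodup →
    (S.map (fun x => if x = a then (1:Int) else 0)).sum = if a ∈ S then 1 else 0 := by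
  intro S
  induction S with
  | nil => simp
  | cons s S ih =>
    intro h
    rcases List.nodup_cons.mp h with ⟨hs, hS⟩
    simp only [List.map_cons, List.sum_cons, ih hS, List.mem_cons]
    by_cases hsa : s = a
    · subst hsa; simp [hs]
    · by_cases ha : a ∈ S <;> simp [hsa, ha, Ne.symm hsa]

-- summing arr-occurrence counts over a duplicate-free list S counts arr's elements lying in S
theorem sum_counts_eq_countP (S : List Int) (hS : S.Nodup) : ∀ (arr : List Int),
    (S.map (fun x => (arr.count x : Int))).sum = (arr.countP (fun i => decide (i ∈ S)) : Int) := by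
  intro arr
  induction arr with
  | nil => simp
  | cons a arr ih =>
    have hc : ∀ x : Int, (((a :: arr).count x : Int)) = (arr.count x : Int) + (if x = a then 1 else 0) := by
      intro x
      by_cases h : x = a
      · simp [h]
      · simp [h, Ne.symm h]
    calc (S.map (fun x => (((a :: arr).count x : Int)))).sum
        = (S.map (fun x => (arr.count x : Int) + if x = a then (1:Int) else 0)).sum := by
          exact congrArg List.sum (List.map_congr_left (fun x _ => hc x))
      _ = (S.map (fun x => (arr.count x : Int))).sum
            + (S.map (fun x => if x = a then (1:Int) else 0)).sum := by
          rw [← List.sum_map_add]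
      _ = ((a :: arr).countP (fun i => decide (i ∈ S)) : Int) := by
          rw [ih, sum_ite_nodup a S hS]
          simp only [List.countP_cons]
          by_cases h : a ∈ S <;> simp [h]

-- ===== VERDICT (by name: the statement is the Claim_ definition above) =====
theorem happiness_count_spec : Claim_equal_happiness_count := by
  intro arr like dislike _
  unfold Spec_happiness_count happiness_count happiness_count_alt
  rw [happinessA_foldl]
  have hcnt : ∀ x : Int,
      ((arr.foldl (fun d x => d.insert x (d.getD x 0 + 1)) (PySem.Dict.empty : PySem.Dict Int Int)).getD x 0)
      = (arr.count x : Int) := by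
    intro x
    rw [PySem.Dict.getD_foldl_insert_add_one]
    simp [PySem.Dict.empty, PySem.Dict.getD, PySem.Dict.get?]
  have hmap : ∀ (S : List Int),
      (S.map (fun x => (arr.foldl (fun d x => d.insert x (d.getD x 0 + 1)) (PySem.Dict.empty : PySem.Dict Int Int)).getD x 0)).sum
      = (S.map (fun x => (arr.count x : Int))).sum := by
    intro S; congr 1; apply List.map_congr_left; intro x _; exact hcnt x
  simp only [hmap]
  rw [sum_counts_eq_countP _ (PySem.Set.nodup_ofList like) arr,
      sum_counts_eq_countP _ (PySem.Set.nodup_ofList dislike) arr]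
  have h1 : arr.countP (fun i => decide (i ∈ PySem.Set.ofList like))
      = arr.countP (fun i => decide (i ∈ like)) := by
    apply List.countP_congr; intro x _; simp [PySem.Set.mem_ofList]
  have h2 : arr.countP (fun i => decide (i ∈ PySem.Set.ofList dislike))
      = arr.countP (fun i => decide (i ∈ dislike)) := by
    apply List.countP_congr; intro x _; simp [PySem.Set.mem_ofList]
  rw [h1, h2]; ring
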